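-- pv_equiv track=rewrite | github.com/EverVino/aoc2025 | day6/2task.py | get_sep
-- ===== SOURCE A (Python) =====
-- def get_sep(matrix):
--     sep_idx = []
--     num_idx = set()
--     for line in matrix:
--         for i, e in enumerate(list(line)):
--             if not e.isnumeric():
--                 if i not in sep_idx and i not in num_idx:
--                     sep_idx.append(i)
--             else:
--                 num_idx.add(i)
--                 if i in sep_idx:
--                     sep_idx.remove(i)
--     return sep_idx
-- ===== SOURCE B (Python) =====
-- def get_sep(matrix):
--     # Pass 1: every column index that is ever numeric in any line.
--     numeric = set()
--     for line in matrix: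
--         for i, e in enumerate(line):
--             if e.isnumeric():
--                 numeric.add(i)
--     # Pass 2: collect, in order of first appearance, the columns never numeric.
--     seen = set()
--     result = []
--     for line in matrix:
--         for i in range(len(line)):
--             if i not in numeric and i not in seen:
--                 seen.add(i)
--                 result.append(i)
--     return result
-- ===== Notes on version B (the rewrite author's own statement) =====
-- stated objective: alternative
-- what changed: A interleaves appends, removals and a blocked-set in one pass; B first builds the set of ever-numeric columns in one pass, then collects never-numeric columns in first-appearance order in a second pass with no removals (inner per-line loop is over indices only, no char test).
import Mathlib
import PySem

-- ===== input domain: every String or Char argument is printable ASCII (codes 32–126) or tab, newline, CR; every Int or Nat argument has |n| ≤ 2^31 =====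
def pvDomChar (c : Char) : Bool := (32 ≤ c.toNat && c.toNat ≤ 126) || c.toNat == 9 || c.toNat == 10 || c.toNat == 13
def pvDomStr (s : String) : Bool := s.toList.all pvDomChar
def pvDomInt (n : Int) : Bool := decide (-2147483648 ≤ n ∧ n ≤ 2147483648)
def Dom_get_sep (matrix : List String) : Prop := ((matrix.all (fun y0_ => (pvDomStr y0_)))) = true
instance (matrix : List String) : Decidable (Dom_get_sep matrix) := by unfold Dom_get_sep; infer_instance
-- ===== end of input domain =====

-- B replaces A's single interleaved pass (append/remove bookkeeping on the result list) by a
-- two-pass scheme: first collect all ever-numeric columns, then collect never-numeric columns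
-- in order of first appearance; same return value, different decomposition ("alternative").


-- ===== PORT A =====
-- one loop-body step of A, over (i, e) pairs from enumerate(list(line)).
-- e.isnumeric() is ported as PySem.Chars.isdigit, exact on the printable-ASCII domain.
-- list.remove is guarded by 'i in sep_idx', so remove? always returns some; .getD is unreachable.
def aStep (st : List Int × PySem.Set Int) (ie : Int × Char) : List Int × PySem.Set Int :=
  if ¬ (PySem.Chars.isdigit ie.2 = true) then
    (if ie.1 ∉ st.1 ∧ ie.1 ∉ st.2 then (st.1 ++ [ie.1], st.2) else st)
  else
    (if ie.1 ∈ st.1 then ((PySem.List.remove? st.1 ie.1).getD st.1, PySem.Set.add st.2 ie.1)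
     else (st.1, PySem.Set.add st.2 ie.1))

def get_sep (matrix : List String) : List Int :=
  (matrix.foldl
    (fun st line => (PySem.List.enumerate line.toList 0).foldl aStep st)
    (([] : List Int), (PySem.Set.empty : PySem.Set Int))).1

-- ===== PORT B =====
-- pass 1 step: numeric.add(i) for every numeric char
def bNumStep (num : PySem.Set Int) (ie : Int × Char) : PySem.Set Int :=
  if PySem.Chars.isdigit ie.2 = true then PySem.Set.add num ie.1 else num

-- pass 2 step: over column indices i of a line; emit i once if never numeric and unseen
def bStep (numeric : PySem.Set Int) (st : PySem.Set Int × List Int) (i : Int) : PySem.Set Int × List Int :=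
  if i ∉ numeric ∧ i ∉ st.1 then (PySem.Set.add st.1 i, st.2 ++ [i]) else st

def get_sep_alt (matrix : List String) : List Int :=
  let numeric : PySem.Set Int :=
    matrix.foldl (fun num line => (PySem.List.enumerate line.toList 0).foldl bNumStep num)
      PySem.Set.empty
  (matrix.foldl
    (fun st line => (PySem.List.pyRange 0 (PySem.Str.len line) 1).foldl (bStep numeric) st)
    ((PySem.Set.empty : PySem.Set Int), ([] : List Int))).2

-- ===== PRECONDITION & SPEC =====
def Spec_get_sep (matrix : List String) (out : List Int) : Prop := out = get_sep_alt matrix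
instance (matrix : List String) (out : List Int) : Decidable (Spec_get_sep matrix out) := by unfold Spec_get_sep; infer_instance

-- ===== CLAIM (what is proved, stated in full; the proofs are below) =====
def Claim_equal_get_sep : Prop := ∀ (matrix : List String), Dom_get_sep matrix → Spec_get_sep matrix (get_sep matrix)

-- ===== LEMMAS AND PROOFS =====

-- the flattened (column index, is-numeric) stream both programs process in order
def pvStream (matrix : List String) : List (Int × Bool) :=
  matrix.flatMap (fun line =>
    (PySem.List.enumerate line.toList 0).map (fun ie => (ie.1, PySem.Chars.isdigit ie.2)))

-- A's step, phrased on the stream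
def aStep' (st : List Int × PySem.Set Int) (x : Int × Bool) : List Int × PySem.Set Int :=
  if ¬ (x.2 = true) then
    (if x.1 ∉ st.1 ∧ x.1 ∉ st.2 then (st.1 ++ [x.1], st.2) else st)
  else
    (if x.1 ∈ st.1 then ((PySem.List.remove? st.1 x.1).getD st.1, PySem.Set.add st.2 x.1)
     else (st.1, PySem.Set.add st.2 x.1))

-- B's steps, phrased on the stream (bStep ignores the char anyway)
def bStep' (numeric : PySem.Set Int) (st : PySem.Set Int × List Int) (x : Int × Bool) : PySem.Set Int × List Int :=
  bStep numeric st x.1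

def bNumStep' (num : PySem.Set Int) (x : Int × Bool) : PySem.Set Int :=
  if x.2 = true then PySem.Set.add num x.1 else num

lemma a_stream_gen (m : List String) (st : List Int × PySem.Set Int) :
    m.foldl (fun st line => (PySem.List.enumerate line.toList 0).foldl aStep st) st
      = (m.flatMap (fun line =>
          (PySem.List.enumerate line.toList 0).map (fun ie => (ie.1, PySem.Chars.isdigit ie.2)))).foldl aStep' st := by
  induction m generalizing st with
  | nil => rfl
  | cons l m ih =>
    simp only [List.foldl_cons, List.flatMap_cons, List.foldl_append, List.foldl_map]
    rw [ih]
    rfl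

lemma a_stream (matrix : List String) :
    get_sep matrix = ((pvStream matrix).foldl aStep' ([], PySem.Set.empty)).1 := by
  unfold get_sep pvStream
  rw [a_stream_gen]

lemma bnum_stream_gen (m : List String) (num : PySem.Set Int) :
    m.foldl (fun num line => (PySem.List.enumerate line.toList 0).foldl bNumStep num) num
      = (m.flatMap (fun line =>
          (PySem.List.enumerate line.toList 0).map (fun ie => (ie.1, PySem.Chars.isdigit ie.2)))).foldl bNumStep' num := by
  induction m generalizing num with
  | nil => rfl
  | cons l m ih =>
    simp only [List.foldl_cons, List.flatMap_cons, List.foldl_append, List.foldl_map]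
    rw [ih]
    rfl

lemma brange_stream_gen (N : PySem.Set Int) (m : List String) (st : PySem.Set Int × List Int) :
    m.foldl (fun st line => (PySem.List.pyRange 0 (PySem.Str.len line) 1).foldl (bStep N) st) st
      = (m.flatMap (fun line =>
          (PySem.List.enumerate line.toList 0).map (fun ie => (ie.1, PySem.Chars.isdigit ie.2)))).foldl (bStep' N) st := by
  induction m generalizing st with
  | nil => rfl
  | cons l m ih =>
    simp only [List.foldl_cons, List.flatMap_cons, List.foldl_append, List.foldl_map]
    rw [ih]
    congr 1
    have hrange : PySem.List.pyRange 0 (PySem.Str.len l) 1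
        = (PySem.List.enumerate l.toList 0).map (·.1) := by
      simp [PySem.Str.len, PySem.List.map_fst_enumerate]
    rw [hrange, List.foldl_map]
    rfl

lemma b_stream (matrix : List String) :
    get_sep_alt matrix =
      ((pvStream matrix).foldl (bStep' ((pvStream matrix).foldl bNumStep' PySem.Set.empty))
        (PySem.Set.empty, [])).2 := by
  unfold get_sep_alt pvStream
  simp only [bnum_stream_gen, brange_stream_gen]

-- membership in the pass-1 numeric set
lemma mem_numFold (s : List (Int × Bool)) (num : PySem.Set Int) (i : Int) :
    i ∈ s.foldl bNumStep' num ↔ i ∈ num ∨ (i, true) ∈ s := by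
  induction s generalizing num with
  | nil => simp
  | cons x s ih =>
    cases x with
    | mk j d =>
      cases d with
      | false => simp [bNumStep', ih]
      | true =>
        simp [bNumStep', ih, PySem.Set.mem_add]
        tauto

-- pass-2 result accumulator splits off
lemma b_res_acc (N : PySem.Set Int) (s : List (Int × Bool)) (S : PySem.Set Int) (res : List Int) :
    (s.foldl (bStep' N) (S, res)).2 = res ++ (s.foldl (bStep' N) (S, [])).2 := by
  induction s generalizing S res with
  | nil => simp
  | cons x s ih =>
    by_cases h : x.1 ∉ N ∧ x.1 ∉ S
    · simp only [List.foldl_cons, bStep', bStep, if_pos h, List.nil_append]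
      rw [ih (S.add x.1) (res ++ [x.1]), ih (S.add x.1) [x.1]]
      simp
    · simp only [List.foldl_cons, bStep', bStep, if_neg h]
      exact ih S res

-- the main invariant: A's in-flight state vs B's global two-pass scheme
lemma main_inv (N : PySem.Set Int) (s : List (Int × Bool)) (sep : List Int) (num S : PySem.Set Int)
    (hnd : sep.Nodup)
    (hdisj : ∀ i ∈ sep, i ∉ num)
    (hnumN : ∀ i ∈ num, i ∈ N)
    (hsN : ∀ i, (i, true) ∈ s → i ∈ N)
    (hNcov : ∀ i ∈ N, i ∈ num ∨ (i, true) ∈ s)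
    (hseen : ∀ i, i ∉ N → (i ∈ S ↔ i ∈ sep)) :
    (s.foldl aStep' (sep, num)).1
      = sep.filter (fun i => decide ((i, true) ∉ s)) ++ (s.foldl (bStep' N) (S, [])).2 := by
  induction s generalizing sep num S with
  | nil => simp
  | cons x s ih =>
    obtain ⟨j, d⟩ := x
    cases d with
    | true =>
      have hjN : j ∈ N := hsN j (by simp)
      -- A's head step removes j from sep (erase, also when absent) and adds it to num
      have hA : aStep' (sep, num) (j, true) = (sep.erase j, PySem.Set.add num j) := by
        by_cases hj : j ∈ sep
        · simp [aStep', hj, PySem.List.remove?_eq_some_erase sep j hj]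
        · simp [aStep', hj, List.erase_of_not_mem hj]
      -- B's head step is a no-op: j ∈ N
      have hB : bStep' N (S, []) (j, true) = (S, []) := by
        simp [bStep', bStep, hjN]
      simp only [List.foldl_cons, hA, hB]
      rw [ih (sep.erase j) (PySem.Set.add num j) S (hnd.erase j)
        (by intro i hi
            have him := List.mem_of_mem_erase hi
            have hne : i ≠ j := by
              intro h; subst h
              exact (List.Nodup.not_mem_erase hnd) hi
            simp only [PySem.Set.mem_add]
            rintro (h | h)
            · exact hdisj i him h
            · exact hne h)
        (by intro i hi
            rcases (PySem.Set.mem_add _ _ _).1 hi with h | h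
            · exact hnumN i h
            · exact h ▸ hjN)
        (fun i hi => hsN i (by simp [hi]))
        (by intro i hiN
            rcases hNcov i hiN with h | h
            · exact Or.inl ((PySem.Set.mem_add _ _ _).2 (Or.inl h))
            · rcases List.mem_cons.1 h with h | h
              · exact Or.inl ((PySem.Set.mem_add _ _ _).2 (Or.inr (by injection h)))
              · exact Or.inr h)
        (by intro i hiN
            have hne : i ≠ j := fun h => hiN (h ▸ hjN)
            rw [hseen i hiN, List.mem_erase_of_ne hne])]
      congr 1
      rw [List.Nodup.erase_eq_filter hnd j]
      rw [List.filter_filter]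
      apply List.filter_congr
      intro i _
      by_cases h1 : i = j <;> by_cases h3 : (i, true) ∈ s <;> simp [h1, h3]
    | false =>
      by_cases hg : j ∉ sep ∧ j ∉ num
      · have hA : aStep' (sep, num) (j, false) = (sep ++ [j], num) := by
          simp [aStep', hg]
        by_cases hjN : j ∈ N
        · -- j is numeric later in s; B skips it, A appends it but the filter drops it
          have hjs : (j, true) ∈ s := by
            rcases hNcov j hjN with h | h
            · exact absurd h hg.2
            · rcases List.mem_cons.1 h with h | h
              · exact absurd (by injection h) (by simp)
              · exact h
          have hB : bStep' N (S, []) (j, false) = (S, []) := by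
            simp [bStep', bStep, hjN]
          simp only [List.foldl_cons, hA, hB]
          rw [ih (sep ++ [j]) num S
            (by simp [List.nodup_append, hnd]; intro a ha h; exact hg.1 (h ▸ ha))
            (by intro i hi
                rcases List.mem_append.1 hi with h | h
                · exact hdisj i h
                · simpa using (List.mem_singleton.1 h) ▸ hg.2)
            hnumN
            (fun i hi => hsN i (by simp [hi]))
            (by intro i hiN
                rcases hNcov i hiN with h | h
                · exact Or.inl h
                · rcases List.mem_cons.1 h with h | h
                  · exact absurd (by injection h) (by simp)
                  · exact Or.inr h)
            (by intro i hiN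
                have hne : i ≠ j := fun h => hiN (h ▸ hjN)
                rw [hseen i hiN]
                simp [hne])]
          congr 1
          rw [List.filter_append]
          have : [j].filter (fun i => decide ((i, true) ∉ s)) = [] := by
            simp [hjs]
          rw [this, List.append_nil]
          apply List.filter_congr
          intro i _
          by_cases h3 : (i, true) ∈ s <;> simp [h3]
        · -- j never numeric: both append j (B emits it now)
          have hjS : j ∉ S := fun h => hg.1 ((hseen j hjN).1 h)
          have hB : bStep' N (S, []) (j, false) = (PySem.Set.add S j, [j]) := by
            simp [bStep', bStep, hjN, hjS]
          have hjs : (j, true) ∉ s := fun h => hjN (hsN j (List.mem_cons_of_mem _ h))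
          simp only [List.foldl_cons, hA, hB]
          rw [b_res_acc, ih (sep ++ [j]) num (PySem.Set.add S j)
            (by simp [List.nodup_append, hnd]; intro a ha h; exact hg.1 (h ▸ ha))
            (by intro i hi
                rcases List.mem_append.1 hi with h | h
                · exact hdisj i h
                · simpa using (List.mem_singleton.1 h) ▸ hg.2)
            hnumN
            (fun i hi => hsN i (by simp [hi]))
            (by intro i hiN
                rcases hNcov i hiN with h | h
                · exact Or.inl h
                · rcases List.mem_cons.1 h with h | h
                  · exact absurd (by injection h) (by simp)
                  · exact Or.inr h)
            (by intro i hiN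
                rw [PySem.Set.mem_add, hseen i hiN]
                simp)]
          rw [List.filter_append]
          have : [j].filter (fun i => decide ((i, true) ∉ s)) = [j] := by
            simp [hjs]
          rw [this]
          have hfc : sep.filter (fun i => decide ((i, true) ∉ (j, false) :: s))
              = sep.filter (fun i => decide ((i, true) ∉ s)) := by
            apply List.filter_congr
            intro i _
            by_cases h3 : (i, true) ∈ s <;> simp [h3]
          rw [hfc]
          simp
      · -- A's guard fails; B's guard fails too
        have hA : aStep' (sep, num) (j, false) = (sep, num) := by
          simp [aStep', hg]
        have hB : bStep' N (S, []) (j, false) = (S, []) := by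
          rw [not_and_or, not_not, not_not] at hg
          by_cases hjsep : j ∈ sep
          · by_cases hjN : j ∈ N
            · simp [bStep', bStep, hjN]
            · have : j ∈ S := (hseen j hjN).2 hjsep
              simp [bStep', bStep, this]
          · have hjnum : j ∈ num := hg.resolve_left hjsep
            simp [bStep', bStep, hnumN j hjnum]
        simp only [List.foldl_cons, hA, hB]
        rw [ih sep num S hnd hdisj hnumN
          (fun i hi => hsN i (by simp [hi]))
          (by intro i hiN
              rcases hNcov i hiN with h | h
              · exact Or.inl h
              · rcases List.mem_cons.1 h with h | h
                · exact absurd (by injection h) (by simp)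
                · exact Or.inr h)
          hseen]
        congr 1
        apply List.filter_congr
        intro i _
        by_cases h3 : (i, true) ∈ s <;> simp [h3]

-- ===== VERDICT (by name: the statement is the Claim_ definition above) =====
theorem get_sep_spec : Claim_equal_get_sep := by
  intro matrix _
  unfold Spec_get_sep
  rw [a_stream, b_stream]
  have h := main_inv ((pvStream matrix).foldl bNumStep' PySem.Set.empty) (pvStream matrix)
      [] PySem.Set.empty PySem.Set.empty
      List.nodup_nil
      (by simp [PySem.Set.empty])
      (by simp [PySem.Set.empty])
      (fun i hi => (mem_numFold _ _ _).2 (Or.inr hi))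
      (fun i hi => Or.inr (((mem_numFold _ _ _).1 hi).resolve_left (by simp [PySem.Set.empty])))
      (by simp [PySem.Set.empty])
  simpa using h
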